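-- pv_equiv track=rewrite | github.com/minseokheo/study | 프로그래머스/1/76501. 음양 더하기/음양 더하기.py | solution
-- ===== SOURCE A (Python) =====
-- def solution(absolutes, signs):
--     answer = 0
--
--     l = len(absolutes)
--
--     for i in range(l):
--         if signs[i] == True:
--             answer += absolutes[i]
--         else:
--             answer -= absolutes[i]
--     return answer
-- ===== SOURCE B (Python) =====
-- def solution(absolutes, signs):
--     pairs = list(zip(absolutes, signs))
--     pos = sum(a for a, s in pairs if s)
--     neg = sum(a for a, s in pairs if not s)
--     return pos - neg
-- ===== Notes on version B (the rewrite author's own statement) =====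
-- stated objective: alternative
-- what changed: Replaces A's indexed for-loop with a branching accumulator by zipping the two lists once and taking two filtered aggregate sums (positives and negatives), returning their difference.
import Mathlib
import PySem

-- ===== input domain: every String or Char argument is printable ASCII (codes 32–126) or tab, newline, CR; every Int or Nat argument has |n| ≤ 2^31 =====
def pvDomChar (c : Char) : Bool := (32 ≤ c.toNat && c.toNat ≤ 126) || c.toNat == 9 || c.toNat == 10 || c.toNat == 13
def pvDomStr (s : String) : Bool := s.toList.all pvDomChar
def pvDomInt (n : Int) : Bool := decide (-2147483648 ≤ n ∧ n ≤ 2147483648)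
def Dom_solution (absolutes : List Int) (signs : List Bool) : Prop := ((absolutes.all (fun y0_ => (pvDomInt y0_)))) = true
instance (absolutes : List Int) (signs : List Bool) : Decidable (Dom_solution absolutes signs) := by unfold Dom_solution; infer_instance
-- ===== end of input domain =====

-- B replaces A's indexed for-loop with a branching accumulator by zipping the lists
-- once and taking two filtered aggregate sums (pos and neg), returning pos - neg.

-- ===== PORT A =====
-- answer = 0; for i in range(len(absolutes)): add absolutes[i] if signs[i] == True else subtract
def solution (absolutes : List Int) (signs : List Bool) : Int :=
  (PySem.List.pyRange 0 (absolutes.length : Int) 1).foldl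
    (fun answer i =>
      if PySem.List.pyGetD signs i false == true then
        answer + PySem.List.pyGetD absolutes i 0
      else
        answer - PySem.List.pyGetD absolutes i 0) 0

-- ===== PORT B =====
-- pairs = list(zip(absolutes, signs)); pos = sum(a for a,s in pairs if s);
-- neg = sum(a for a,s in pairs if not s); return pos - neg
def solution_alt (absolutes : List Int) (signs : List Bool) : Int :=
  let pairs := absolutes.zip signs
  let pos := pairs.foldl (fun acc p => if p.2 then acc + p.1 else acc) 0
  let neg := pairs.foldl (fun acc p => if !p.2 then acc + p.1 else acc) 0
  pos - neg

-- ===== PRECONDITION & SPEC =====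
-- A raises IndexError on signs[i] when signs is shorter than absolutes; those inputs are excluded.
def Pre_solution (absolutes : List Int) (signs : List Bool) : Prop :=
  absolutes.length ≤ signs.length
instance (absolutes : List Int) (signs : List Bool) : Decidable (Pre_solution absolutes signs) := by
  unfold Pre_solution; infer_instance

def pvWitness_solution : List Int × List Bool := ([4, 7, 12], [true, false, true])

def Spec_solution (absolutes : List Int) (signs : List Bool) (out : Int) : Prop := out = solution_alt absolutes signs
instance (absolutes : List Int) (signs : List Bool) (out : Int) : Decidable (Spec_solution absolutes signs out) := by unfold Spec_solution; infer_instance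

-- ===== CLAIM (what is proved, stated in full; the proofs are below) =====
def Claim_equal_solution : Prop := ∀ (absolutes : List Int) (signs : List Bool), Dom_solution absolutes signs → Pre_solution absolutes signs → Spec_solution absolutes signs (solution absolutes signs)

-- ===== LEMMAS AND PROOFS =====

-- the common value both programs compute: the signed sum over the zipped pairs
def pvSigned (pairs : List (Int × Bool)) : Int :=
  (pairs.map (fun p => if p.2 then p.1 else -p.1)).sum

-- A's fold over range(0, n) equals the signed sum of the first n zipped pairs
theorem solution_A_key (absolutes : List Int) (signs : List Bool)
    (hlen : absolutes.length ≤ signs.length) :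
    ∀ n : Nat, n ≤ absolutes.length →
    (PySem.List.pyRange 0 (n : Int) 1).foldl
      (fun answer i =>
        if PySem.List.pyGetD signs i false == true then
          answer + PySem.List.pyGetD absolutes i 0
        else
          answer - PySem.List.pyGetD absolutes i 0) 0
    = pvSigned ((absolutes.take n).zip (signs.take n)) := by
  intro n
  induction n with
  | zero => intro _; simp [PySem.List.pyRange_one_eq_nil, pvSigned]
  | succ n ih =>
    intro hn
    have hn' : n ≤ absolutes.length := by omega
    have hna : n < absolutes.length := by omega
    have hns : n < signs.length := by omega
    have h : ((n : Int) + 1) = ((n + 1 : Nat) : Int) := by push_cast; ring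
    rw [← h, PySem.List.pyRange_one_succ_right (by omega : (0:Int) ≤ (n:Int)),
        List.foldl_append, ih hn']
    simp only [List.foldl_cons, List.foldl_nil]
    rw [PySem.List.pyGetD_natCast, PySem.List.pyGetD_natCast]
    have hta : absolutes.take (n+1) = absolutes.take n ++ [absolutes[n]] :=
      List.take_succ_eq_append_getElem hna
    have hts : signs.take (n+1) = signs.take n ++ [signs[n]] :=
      List.take_succ_eq_append_getElem hns
    have hlt : (absolutes.take n).length = (signs.take n).length := by
      simp [List.length_take]; omega
    rw [hta, hts]
    unfold pvSigned
    rw [List.zip_append hlt]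
    simp [hna, hns]
    by_cases hs : signs[n] = true <;> simp [hs] <;> ring

-- pos - neg over a pair list equals its signed sum (generalized accumulators)
theorem solution_B_key : ∀ (pairs : List (Int × Bool)) (p0 n0 : Int),
    pairs.foldl (fun acc p => if p.2 then acc + p.1 else acc) p0
    - pairs.foldl (fun acc p => if !p.2 then acc + p.1 else acc) n0
    = p0 - n0 + pvSigned pairs := by
  intro pairs
  induction pairs with
  | nil => intro p0 n0; simp [pvSigned]
  | cons p rest ih =>
    intro p0 n0
    simp only [List.foldl_cons]
    by_cases hs : p.2 <;>
      simp only [hs, Bool.not_true, Bool.not_false, ih, pvSigned,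
        List.map_cons, List.sum_cons] <;> simp <;> ring

-- zip ignores the part of the right list beyond the left list's length
theorem pv_zip_take_right {α β : Type} : ∀ (xs : List α) (ys : List β),
    xs.zip (ys.take xs.length) = xs.zip ys := by
  intro xs
  induction xs with
  | nil => intro ys; simp
  | cons x xs ih =>
    intro ys
    cases ys with
    | nil => simp
    | cons y ys => simp [ih]

theorem solution_eq (absolutes : List Int) (signs : List Bool)
    (hlen : absolutes.length ≤ signs.length) :
    solution absolutes signs = solution_alt absolutes signs := by
  unfold solution solution_alt
  rw [solution_A_key absolutes signs hlen absolutes.length le_rfl,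
      List.take_of_length_le le_rfl, pv_zip_take_right,
      solution_B_key (absolutes.zip signs) 0 0]
  ring

-- ===== VERDICT (by name: the statement is the Claim_ definition above) =====
theorem solution_spec : Claim_equal_solution := by
  intro absolutes signs _ hpre
  exact solution_eq absolutes signs hpre
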